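-- pv_equiv track=rewrite | github.com/oscartangozero/yandex-algorithm-trainings | v1.0/1/G.py | parts_output
-- ===== SOURCE A (Python) =====
-- def parts_output(material: int, block: int, part: int) -> int:
--     if not (material >= block >= part):
--         return 0
--     parts_per_block, leftover_per_block = divmod(block, part)
--     parts_produced = 0
--     while material >= block:
--         blocks_number, material = divmod(material, block)
--         parts_produced += parts_per_block * blocks_number
--         material += leftover_per_block * blocks_number
--     return parts_produced
-- ===== SOURCE B (Python) =====
-- def parts_output(material: int, block: int, part: int) -> int:
--     if not (material >= block >= part):
--         return 0
--     parts_per_block, leftover_per_block = divmod(block, part)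
--     net = block - leftover_per_block
--     blocks_total = (material - block + net) // net
--     return parts_per_block * blocks_total
-- ===== Notes on version B (the rewrite author's own statement) =====
-- stated objective: alternative
-- what changed: Replaces A's batched divmod loop (repeated until material < block) with a closed-form computation: each produced block consumes a fixed net amount block - leftover, so the total block count is the ceiling division (material - block + net) // net, evaluated once.
-- outside the precondition, e.g. on parts_output(10, 3, -2): A returns -6, B returns -4
import Mathlib
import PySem

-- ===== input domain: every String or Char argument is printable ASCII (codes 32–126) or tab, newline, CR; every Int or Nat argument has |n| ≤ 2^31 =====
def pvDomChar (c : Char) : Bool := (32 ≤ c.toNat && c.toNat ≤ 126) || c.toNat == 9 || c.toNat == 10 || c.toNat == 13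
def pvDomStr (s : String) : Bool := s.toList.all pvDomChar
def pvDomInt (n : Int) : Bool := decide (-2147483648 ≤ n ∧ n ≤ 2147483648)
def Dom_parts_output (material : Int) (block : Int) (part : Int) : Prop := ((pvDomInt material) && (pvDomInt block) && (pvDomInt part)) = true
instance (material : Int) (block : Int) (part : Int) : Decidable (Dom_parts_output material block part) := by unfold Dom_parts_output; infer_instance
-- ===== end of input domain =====

-- B replaces A's batched divmod loop by a single closed-form ceiling division (alternative algorithm, same observable results on Pre_).

-- ===== PORT A =====
-- A's while loop: each pass does blocks_number, material = divmod(material, block);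
-- parts_produced += parts_per_block * blocks_number; material += leftover_per_block * blocks_number.
-- The inner dite is only a totality guard (under Pre_ the new material is always smaller);
-- its else-branch is unreachable on Pre_.
def partsLoopA (block ppb lpb : Int) (material parts : Int) : Int :=
  if block ≤ material then
    let q := PySem.Int.floordiv material block
    let r := PySem.Int.mod material block
    let material' := r + lpb * q
    let parts' := parts + ppb * q
    if h : material'.toNat < material.toNat then
      partsLoopA block ppb lpb material' parts'
    else parts'
  else parts
termination_by material.toNat
decreasing_by exact h

def parts_output (material : Int) (block : Int) (part : Int) : Int :=
  if block ≤ material ∧ part ≤ block then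
    partsLoopA block (PySem.Int.floordiv block part) (PySem.Int.mod block part) material 0
  else 0

-- ===== PORT B =====
def parts_output_alt (material : Int) (block : Int) (part : Int) : Int :=
  if block ≤ material ∧ part ≤ block then
    let ppb := PySem.Int.floordiv block part
    let lpb := PySem.Int.mod block part
    let net := block - lpb
    let blocksTotal := PySem.Int.floordiv (material - block + net) net
    ppb * blocksTotal
  else 0

-- ===== PRECONDITION & SPEC =====
-- Pre_ excludes non-positive `part` when the guard material ≥ block ≥ part passes: those inputs are
-- outside the function's natural domain of positive sizes — there A raises ZeroDivisionError
-- (part = 0, or block = 0), diverges, or returns a meaningless negative count.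
def Pre_parts_output (material : Int) (block : Int) (part : Int) : Prop :=
  1 ≤ part ∨ ¬(block ≤ material ∧ part ≤ block)
instance (material : Int) (block : Int) (part : Int) : Decidable (Pre_parts_output material block part) := by unfold Pre_parts_output; infer_instance

def pvWitness_parts_output : Int × Int × Int := (10, 3, 2)

def Spec_parts_output (material : Int) (block : Int) (part : Int) (out : Int) : Prop := out = parts_output_alt material block part
instance (material : Int) (block : Int) (part : Int) (out : Int) : Decidable (Spec_parts_output material block part out) := by unfold Spec_parts_output; infer_instance

-- ===== CLAIM (what is proved, stated in full; the proofs are below) =====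
def Claim_equal_parts_output : Prop := ∀ (material : Int) (block : Int) (part : Int), Dom_parts_output material block part → Pre_parts_output material block part → Spec_parts_output material block part (parts_output material block part)

-- ===== LEMMAS AND PROOFS =====

-- Closed form for the number of blocks still producible from `material`.
def pvK (block net material : Int) : Int :=
  if block ≤ material then PySem.Int.floordiv (material - block + net) net else 0

lemma pvK_nonpos (block net material : Int) (h : ¬ block ≤ material) :
    pvK block net material = 0 := by simp [pvK, h]

-- One batched step of A advances the closed form by exactly `material // block` blocks.
lemma pvK_step (block lpb material : Int) (hb : 0 < block) (hlpb0 : 0 ≤ lpb)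
    (hlpb : lpb < block) (hm : block ≤ material) :
    pvK block (block - lpb) material =
      PySem.Int.floordiv material block +
      pvK block (block - lpb)
        (PySem.Int.mod material block + lpb * PySem.Int.floordiv material block) := by
  have hq1 : 1 ≤ PySem.Int.floordiv material block :=
    (PySem.Int.le_floordiv_iff_mul_le hb).mpr (by omega)
  have hid := PySem.Int.floordiv_mul_add_mod material block
  have hr0 := PySem.Int.mod_nonneg material hb
  have hrlt := PySem.Int.mod_lt material hb
  have hnet : (0:Int) < block - lpb := by omega
  have hmm : material - block + (block - lpb)
      = (PySem.Int.mod material block + lpb * PySem.Int.floordiv material block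
          - block + (block - lpb))
        + PySem.Int.floordiv material block * (block - lpb) := by linear_combination -hid
  by_cases h2 : block ≤ PySem.Int.mod material block + lpb * PySem.Int.floordiv material block
  · simp only [pvK, if_pos hm, if_pos h2]
    rw [hmm, PySem.Int.floordiv_eq_ediv_of_pos hnet, PySem.Int.floordiv_eq_ediv_of_pos hnet,
        Int.add_mul_ediv_right _ _ (by omega : block - lpb ≠ 0)]
    ring
  · simp only [pvK, if_pos hm, if_neg h2]
    have hlow : 0 ≤ PySem.Int.mod material block + lpb * PySem.Int.floordiv material block
        - block + (block - lpb) := by nlinarith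
    have hhigh : PySem.Int.mod material block + lpb * PySem.Int.floordiv material block
        - block + (block - lpb) < block - lpb := by omega
    rw [hmm, PySem.Int.floordiv_eq_ediv_of_pos hnet,
        Int.add_mul_ediv_right _ _ (by omega : block - lpb ≠ 0),
        Int.ediv_eq_zero_of_lt hlow hhigh]
    ring

-- A's loop computes parts + ppb * pvK, for any 0 ≤ lpb < block.
lemma partsLoopA_closed (block ppb lpb : Int) (hb : 0 < block) (hlpb0 : 0 ≤ lpb)
    (hlpb : lpb < block) :
    ∀ (n : Nat) (material parts : Int), material.toNat ≤ n →
      partsLoopA block ppb lpb material parts = parts + ppb * pvK block (block - lpb) material := by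
  intro n
  induction n with
  | zero =>
      intro material parts hle
      have hm : ¬ block ≤ material := by omega
      rw [partsLoopA]
      simp [hm, pvK_nonpos block (block - lpb) material hm]
  | succ n ih =>
      intro material parts hle
      by_cases hm : block ≤ material
      · have hq1 : 1 ≤ PySem.Int.floordiv material block :=
          (PySem.Int.le_floordiv_iff_mul_le hb).mpr (by omega)
        have hid := PySem.Int.floordiv_mul_add_mod material block
        have hr0 := PySem.Int.mod_nonneg material hb
        have hm'lt : PySem.Int.mod material block
            + lpb * PySem.Int.floordiv material block < material := by nlinarith
        have hm'0 : 0 ≤ PySem.Int.mod material block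
            + lpb * PySem.Int.floordiv material block := by nlinarith
        have hdec : (PySem.Int.mod material block
            + lpb * PySem.Int.floordiv material block).toNat < material.toNat := by omega
        rw [partsLoopA]
        simp only [if_pos hm]
        rw [dif_pos hdec, ih _ _ (by omega)]
        rw [pvK_step block lpb material hb hlpb0 hlpb hm]
        ring
      · rw [partsLoopA]
        simp [hm, pvK_nonpos block (block - lpb) material hm]

-- ===== VERDICT (by name: the statement is the Claim_ definition above) =====
theorem parts_output_spec : Claim_equal_parts_output := by
  intro material block part _hdom hpre
  unfold Spec_parts_output parts_output parts_output_alt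
  by_cases hg : block ≤ material ∧ part ≤ block
  · have hp : 1 ≤ part := by
      rcases hpre with h | h
      · exact h
      · exact absurd hg h
    have hb : 0 < block := by omega
    have hlpb0 : 0 ≤ PySem.Int.mod block part := PySem.Int.mod_nonneg block (by omega)
    have hlpb : PySem.Int.mod block part < block :=
      lt_of_lt_of_le (PySem.Int.mod_lt block (by omega)) hg.2
    simp only [if_pos hg]
    rw [partsLoopA_closed block (PySem.Int.floordiv block part) (PySem.Int.mod block part)
        hb hlpb0 hlpb material.toNat material 0 le_rfl]
    simp only [pvK, if_pos hg.1]
    ring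
  · simp [hg]
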